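-- pv_equiv track=rewrite | github.com/miliar/Code_Jam_Webscraper | solutions_python/solutions_year10_round0_nr1/696.py | snap
-- ===== SOURCE A (Python) =====
-- def snap(snappers):
-- 	index = 0
-- 	while(index < len(snappers) and snappers[index] != 0):
-- 		index += 1
-- 	for i in range(0, index + 1):
-- 		if(i + 1 > len(snappers)):
-- 			continue
-- 		snappers[i] += 1
-- 		snappers[i] %= 2
-- 	return snappers
-- ===== SOURCE B (Python) =====
-- def snap(snappers):
--     for i in range(len(snappers)):
--         was_zero = snappers[i] == 0
--         snappers[i] = (snappers[i] + 1) % 2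
--         if was_zero:
--             break
--     return snappers
-- ===== Notes on version B (the rewrite author's own statement) =====
-- stated objective: simpler
-- what changed: Fuses A's two sequential loops (a while-scan that finds the first zero, then a flip loop over range(index+1) with a length guard) into one single pass that flips each element and breaks right after flipping the first zero, needing no index bookkeeping or guard.
import Mathlib
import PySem

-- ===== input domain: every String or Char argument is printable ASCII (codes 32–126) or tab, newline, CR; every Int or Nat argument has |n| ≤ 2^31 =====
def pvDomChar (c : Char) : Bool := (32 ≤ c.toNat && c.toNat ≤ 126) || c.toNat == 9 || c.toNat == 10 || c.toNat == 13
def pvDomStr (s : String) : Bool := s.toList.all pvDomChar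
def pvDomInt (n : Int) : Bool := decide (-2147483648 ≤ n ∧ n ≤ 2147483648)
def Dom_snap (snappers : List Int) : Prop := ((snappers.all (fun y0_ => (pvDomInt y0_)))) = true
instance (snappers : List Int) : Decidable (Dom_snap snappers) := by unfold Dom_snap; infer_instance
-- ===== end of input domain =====

-- B fuses A's find-first-zero scan and prefix-flip loop into one pass with a break (objective: simpler).
-- Both Pythons mutate the argument list in place identically; the theorems are about the return value.

-- ===== PORT A =====
-- the while loop: advance index while index < len(snappers) and snappers[index] != 0
def snapWhile (snappers : List Int) (index : Nat) : Nat :=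
  if h : index < snappers.length ∧ PySem.List.pyGetD snappers (index : Int) 0 ≠ 0 then
    snapWhile snappers (index + 1)
  else index
termination_by snappers.length - index

def snap (snappers : List Int) : List Int :=
  let index : Nat := snapWhile snappers 0
  (PySem.List.pyRange 0 ((index : Int) + 1) 1).foldl
    (fun acc i =>
      if i + 1 > (acc.length : Int) then acc
      else acc.set i.toNat (PySem.Int.mod (PySem.List.pyGetD acc i 0 + 1) 2)) snappers

-- ===== PORT B =====
-- one pass: flip each element; right after flipping a zero, stop (the break)
def snap_alt : List Int → List Int
  | [] => []
  | x :: xs => PySem.Int.mod (x + 1) 2 :: (if x = 0 then xs else snap_alt xs)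

-- ===== PRECONDITION & SPEC =====
def Spec_snap (snappers : List Int) (out : List Int) : Prop := out = snap_alt snappers
instance (snappers : List Int) (out : List Int) : Decidable (Spec_snap snappers out) := by unfold Spec_snap; infer_instance

-- ===== CLAIM (what is proved, stated in full; the proofs are below) =====
def Claim_equal_snap : Prop := ∀ (snappers : List Int), Dom_snap snappers → Spec_snap snappers (snap snappers)


-- ===== LEMMAS AND PROOFS =====

-- the fold body of A's for loop, as a named function
def snapF (acc : List Int) (i : Int) : List Int :=
  if i + 1 > (acc.length : Int) then acc
  else acc.set i.toNat (PySem.Int.mod (PySem.List.pyGetD acc i 0 + 1) 2)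

theorem snapWhile_cons (x : Int) (xs : List Int) (index : Nat) :
    snapWhile (x :: xs) (index + 1) = snapWhile xs index + 1 := by
  induction hn : xs.length - index generalizing index with
  | zero =>
      have h1 : ¬ (index + 1 < (x :: xs).length ∧
          PySem.List.pyGetD (x :: xs) ((index + 1 : Nat) : Int) 0 ≠ 0) := by
        simp only [List.length_cons]; omega
      have h2 : ¬ (index < xs.length ∧ PySem.List.pyGetD xs ((index : Nat) : Int) 0 ≠ 0) := by
        omega
      rw [snapWhile, dif_neg h1]
      conv_rhs => rw [snapWhile]
      rw [dif_neg h2]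
  | succ n ih =>
      have hidx : index < xs.length := by omega
      have hget : PySem.List.pyGetD (x :: xs) ((index + 1 : Nat) : Int) 0 =
          PySem.List.pyGetD xs ((index : Nat) : Int) 0 := by
        simp [PySem.List.pyGetD, PySem.List.pyGet?_cons_succ]
      by_cases hz : PySem.List.pyGetD xs ((index : Nat) : Int) 0 = 0
      · have h1 : ¬ (index + 1 < (x :: xs).length ∧
            PySem.List.pyGetD (x :: xs) ((index + 1 : Nat) : Int) 0 ≠ 0) := by
          rw [hget]; tauto
        have h2 : ¬ (index < xs.length ∧ PySem.List.pyGetD xs ((index : Nat) : Int) 0 ≠ 0) := by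
          tauto
        rw [snapWhile, dif_neg h1]
        conv_rhs => rw [snapWhile]
        rw [dif_neg h2]
      · have h1 : (index + 1 < (x :: xs).length ∧
            PySem.List.pyGetD (x :: xs) ((index + 1 : Nat) : Int) 0 ≠ 0) := by
          rw [hget]; exact ⟨by simp only [List.length_cons]; omega, hz⟩
        have h2 : (index < xs.length ∧ PySem.List.pyGetD xs ((index : Nat) : Int) 0 ≠ 0) :=
          ⟨hidx, hz⟩
        rw [snapWhile, dif_pos h1]
        conv_rhs => rw [snapWhile]
        rw [dif_pos h2]
        exact ih (index + 1) (by omega)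

theorem snapF_shift (y : Int) (acc : List Int) (i : Int) (hi : 0 ≤ i) :
    snapF (y :: acc) (i + 1) = y :: snapF acc i := by
  obtain ⟨n, rfl⟩ := Int.eq_ofNat_of_zero_le hi
  unfold snapF
  by_cases h : (n : Int) + 1 > (acc.length : Int)
  · rw [if_pos (by simp only [List.length_cons]; push_cast; omega), if_pos h]
  · rw [if_neg (by simp only [List.length_cons]; push_cast; omega), if_neg h]
    have ht : ((n : Int) + 1).toNat = n + 1 := by omega
    have ht0 : ((n : Int)).toNat = n := by omega
    have hg : PySem.List.pyGetD (y :: acc) ((n : Int) + 1) 0 = PySem.List.pyGetD acc (n : Int) 0 := by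
      have hc : ((n : Int) + 1) = ((n + 1 : Nat) : Int) := by push_cast; ring
      rw [hc]; simp [PySem.List.pyGetD, PySem.List.pyGet?_cons_succ]
    rw [ht, ht0, hg, List.set_cons_succ]

theorem foldl_snapF_shift (r : List Int) (y : Int) (acc : List Int)
    (hr : ∀ i ∈ r, 0 ≤ i) :
    (r.map (· + 1)).foldl snapF (y :: acc) = y :: r.foldl snapF acc := by
  induction r generalizing acc with
  | nil => rfl
  | cons i r ih =>
      simp only [List.map_cons, List.foldl_cons]
      rw [snapF_shift y acc i (hr i (by simp))]
      exact ih _ (fun j hj => hr j (by simp [hj]))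

theorem snapF_head (x : Int) (xs : List Int) :
    snapF (x :: xs) 0 = PySem.Int.mod (x + 1) 2 :: xs := by
  unfold snapF
  rw [if_neg (by simp only [List.length_cons]; push_cast; omega)]
  simp [PySem.List.pyGetD_zero_cons]

theorem snap_eq_alt (s : List Int) :
    (PySem.List.pyRange 0 ((snapWhile s 0 : Int) + 1) 1).foldl snapF s = snap_alt s := by
  induction s with
  | nil =>
      have hw0 : snapWhile [] 0 = 0 := by rw [snapWhile]; simp
      rw [hw0]
      simp only [Nat.cast_zero, zero_add]
      rw [show PySem.List.pyRange 0 1 1 = [0] from by decide]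
      simp [snapF, snap_alt]
  | cons x xs ih =>
      by_cases hx : x = 0
      · have hw : snapWhile (x :: xs) 0 = 0 := by
          rw [snapWhile]
          exact dif_neg (by intro h; exact h.2 (by simpa using hx))
        rw [hw]
        simp only [Nat.cast_zero, zero_add]
        rw [show PySem.List.pyRange 0 1 1 = [0] from by decide]
        simp only [List.foldl_cons, List.foldl_nil]
        rw [snapF_head]
        simp [snap_alt, hx]
      · have hw : snapWhile (x :: xs) 0 = snapWhile xs 0 + 1 := by
          rw [snapWhile]
          rw [dif_pos ⟨by simp only [List.length_cons]; omega, by simpa using hx⟩]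
          exact snapWhile_cons x xs 0
        rw [hw]
        set n : Int := (snapWhile xs 0 : Int) with hn
        have hn0 : 0 ≤ n := by rw [hn]; exact Int.natCast_nonneg _
        have hcast : ((snapWhile xs 0 + 1 : Nat) : Int) = n + 1 := by
          push_cast; rw [hn]
        rw [hcast]
        have hsplit : PySem.List.pyRange 0 (n + 1 + 1) 1 =
            0 :: PySem.List.pyRange 1 (n + 1 + 1) 1 :=
          PySem.List.pyRange_one_cons (by omega)
        have hmap : PySem.List.pyRange 1 (n + 1 + 1) 1 =
            (PySem.List.pyRange 0 (n + 1) 1).map (· + 1) := by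
          rw [PySem.List.pyRange_one, PySem.List.pyRange_one]
          have heq : (n + 1 + 1 - 1).toNat = (n + 1 - 0).toNat := by omega
          rw [heq, List.map_map]
          exact List.map_congr_left (fun k _ => by simp only [Function.comp_apply]; ring)
        rw [hsplit, hmap, List.foldl_cons, snapF_head, foldl_snapF_shift _ _ _
          (fun i hi => (PySem.List.mem_pyRange_one.mp hi).1), ih]
        simp [snap_alt, hx]

-- ===== VERDICT (by name: the statement is the Claim_ definition above) =====
theorem snap_spec : Claim_equal_snap := by
  intro s _
  show snap s = snap_alt s
  show (PySem.List.pyRange 0 ((snapWhile s 0 : Int) + 1) 1).foldl snapF s = snap_alt s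
  exact snap_eq_alt s
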